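-- pv_equiv track=rewrite | github.com/smit-tejani/SmartAssist-Campus-Services-Assistant | rag_pipeline.py | format_sources_md
-- ===== SOURCE A (Python) =====
-- def format_sources_md(articles):
--     """Build a markdown sources list with clickable links (if present)."""
--     if not articles:
--         return ""
--     lines = []
--     seen = set()
--     for a in articles:
--         title = (a.get("title") or "Untitled").strip()
--         url = (a.get("url") or a.get("source") or "").strip()  # support either field name
--         key = (title, url)
--         if key in seen:
--             continue
--         seen.add(key)
--         if url:
--             lines.append(f"- [{title}]({url})")
--         else:
--             lines.append(f"- {title}")
--     return "\n".join(lines)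
-- ===== SOURCE B (Python) =====
-- def format_sources_md(articles):
--     """Build a markdown sources list with clickable links (if present)."""
--     if not articles:
--         return ""
--     pairs = [((a.get("title") or "Untitled").strip(),
--               (a.get("url") or a.get("source") or "").strip())
--              for a in articles]
--     # Repeated-filtering dedup: emit the head, drop all its later duplicates,
--     # repeat on what remains.  No seen-set/dict is maintained at all.
--     lines = []
--     rest = pairs
--     while rest:
--         t, u = rest[0]
--         lines.append(f"- [{t}]({u})" if u else f"- {t}")
--         rest = [q for q in rest[1:] if q != rest[0]]
--     return "\n".join(lines)
-- ===== Notes on version B (the rewrite author's own statement) =====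
-- stated objective: alternative
-- what changed: Replaced A's single fused pass with a seen-set by a dedup-by-repeated-filtering algorithm: extract all (title,url) pairs first, then repeatedly emit the head pair and filter its duplicates out of the remaining list, so no seen container exists at all.
import Mathlib
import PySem

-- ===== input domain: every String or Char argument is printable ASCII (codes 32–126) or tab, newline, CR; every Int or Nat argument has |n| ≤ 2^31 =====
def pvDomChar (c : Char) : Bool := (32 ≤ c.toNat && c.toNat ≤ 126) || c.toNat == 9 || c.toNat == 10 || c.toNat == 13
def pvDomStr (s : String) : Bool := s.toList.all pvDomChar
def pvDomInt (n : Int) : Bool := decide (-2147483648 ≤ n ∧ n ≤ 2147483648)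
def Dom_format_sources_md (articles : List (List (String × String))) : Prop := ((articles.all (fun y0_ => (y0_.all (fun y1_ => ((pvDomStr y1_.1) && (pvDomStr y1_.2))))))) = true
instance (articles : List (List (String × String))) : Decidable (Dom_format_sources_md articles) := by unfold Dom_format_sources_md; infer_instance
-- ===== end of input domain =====

-- B replaces A's fused seen-set loop with dedup by repeated filtering (emit head,
-- filter its duplicates out of the rest, repeat); no seen container at all. Same
-- output, quadratic instead of linear: a genuinely different algorithm, not faster.

-- ===== PORT A =====
def format_sources_md (articles : List (List (String × String))) : String :=
  if articles = [] then ""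
  else
    let st := articles.foldl
      (fun (st : List String × PySem.Set (String × String)) a =>
        let t := PySem.Dict.getD (PySem.Dict.mk a) "title" ""
        let title := PySem.Str.strip (if t = "" then "Untitled" else t)
        let u := PySem.Dict.getD (PySem.Dict.mk a) "url" ""
        let url := PySem.Str.strip (if u = "" then PySem.Dict.getD (PySem.Dict.mk a) "source" "" else u)
        let key := (title, url)
        if PySem.Set.contains st.2 key then st
        else
          (st.1 ++ [if url ≠ "" then "- [" ++ title ++ "](" ++ url ++ ")" else "- " ++ title],
           PySem.Set.add st.2 key))
      ([], PySem.Set.empty)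
    PySem.Str.join "\n" st.1

-- ===== PORT B =====
-- the pair-extraction comprehension of Source B
def fsPair (a : List (String × String)) : String × String :=
  let t := PySem.Dict.getD (PySem.Dict.mk a) "title" ""
  let title := PySem.Str.strip (if t = "" then "Untitled" else t)
  let u := PySem.Dict.getD (PySem.Dict.mk a) "url" ""
  let url := PySem.Str.strip (if u = "" then PySem.Dict.getD (PySem.Dict.mk a) "source" "" else u)
  (title, url)

-- Source B's while loop: emit head's line, filter its duplicates out of the rest, repeat
def fsLoop : List (String × String) → List String → List String
  | [], lines => lines
  | p :: rest, lines =>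
      fsLoop (rest.filter (fun q => q ≠ p))
        (lines ++ [if p.2 ≠ "" then "- [" ++ p.1 ++ "](" ++ p.2 ++ ")" else "- " ++ p.1])
termination_by l _ => l.length
decreasing_by
  simp only [List.length_unattach, List.length_cons]
  exact Nat.lt_succ_of_le (le_trans (List.length_filter_le _ _) (by simp))

def format_sources_md_alt (articles : List (List (String × String))) : String :=
  if articles = [] then ""
  else PySem.Str.join "\n" (fsLoop (articles.map fsPair) [])

-- ===== PRECONDITION & SPEC =====
def Spec_format_sources_md (articles : List (List (String × String))) (out : String) : Prop := out = format_sources_md_alt articles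
instance (articles : List (List (String × String))) (out : String) : Decidable (Spec_format_sources_md articles out) := by unfold Spec_format_sources_md; infer_instance

-- ===== CLAIM (what is proved, stated in full; the proofs are below) =====
def Claim_equal_format_sources_md : Prop := ∀ (articles : List (List (String × String))), Dom_format_sources_md articles → Spec_format_sources_md articles (format_sources_md articles)

-- ===== LEMMAS AND PROOFS =====

def fsRender (p : String × String) : String :=
  if p.2 ≠ "" then "- [" ++ p.1 ++ "](" ++ p.2 ++ ")" else "- " ++ p.1

lemma fsLoop_nil (l : List String) : fsLoop [] l = l := by
  simp [fsLoop]

lemma fsLoop_cons (p : String × String) (rest : List (String × String)) (l : List String) :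
    fsLoop (p :: rest) l = fsLoop (rest.filter (fun q => q ≠ p)) (l ++ [fsRender p]) := by
  conv_lhs => rw [fsLoop.eq_def]
  simp [fsRender]

-- Set.update only appends elements.
lemma fs_prefix : ∀ (ks : List (String × String)) (s : PySem.Set (String × String)),
    ∃ t, PySem.Set.update s ks = s ++ t := by
  intro ks
  induction ks with
  | nil => intro s; exact ⟨[], by simp [PySem.Set.update]⟩
  | cons k ks ih =>
    intro s
    rw [PySem.Set.update_cons]
    obtain ⟨t, ht⟩ := ih (PySem.Set.add s k)
    by_cases h : k ∈ s
    · exact ⟨t, by simpa [PySem.Set.add, h] using ht⟩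
    · refine ⟨[k] ++ t, ?_⟩
      rw [ht]; simp [PySem.Set.add, h]

-- A's loop, generalized over its state: the lines it appends render exactly the
-- elements Set.update appends to the seen set, in order.
lemma fs_core : ∀ (ks : List (String × String)) (s : PySem.Set (String × String)) (l : List String),
    ks.foldl
      (fun (st : List String × PySem.Set (String × String)) k =>
        if PySem.Set.contains st.2 k then st else (st.1 ++ [fsRender k], PySem.Set.add st.2 k))
      (l, s)
    = (l ++ ((PySem.Set.update s ks).drop s.length).map fsRender, PySem.Set.update s ks) := by
  intro ks
  induction ks with
  | nil => intro s l; simp [PySem.Set.update]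
  | cons k ks ih =>
    intro s l
    rw [List.foldl_cons, PySem.Set.update_cons]
    by_cases h : k ∈ s
    · have hc : PySem.Set.contains s k = true := (PySem.Set.contains_iff s k).mpr h
      have hadd : PySem.Set.add s k = s := by simp [PySem.Set.add, h]
      simp only [hc, if_true, hadd]
      exact ih s l
    · have hc : PySem.Set.contains s k = false := by
        simpa using fun hm => h ((PySem.Set.contains_iff s k).mp hm)
      have hadd : PySem.Set.add s k = s ++ [k] := by simp [PySem.Set.add, h]
      simp only [hc, if_false, Bool.false_eq_true, hadd]
      rw [ih (s ++ [k]) (l ++ [fsRender k])]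
      obtain ⟨t, ht⟩ := fs_prefix ks (s ++ [k])
      rw [ht]
      have h1 : ((s ++ [k]) ++ t).drop s.length = [k] ++ t := by
        rw [List.append_assoc]; simp
      have h2 : ((s ++ [k]) ++ t).drop (s ++ [k]).length = t := by simp
      rw [h1, h2]
      simp

lemma fs_step_eq : (fun (st : List String × PySem.Set (String × String)) a =>
        let t := PySem.Dict.getD (PySem.Dict.mk a) "title" ""
        let title := PySem.Str.strip (if t = "" then "Untitled" else t)
        let u := PySem.Dict.getD (PySem.Dict.mk a) "url" ""
        let url := PySem.Str.strip (if u = "" then PySem.Dict.getD (PySem.Dict.mk a) "source" "" else u)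
        let key := (title, url)
        if PySem.Set.contains st.2 key then st
        else
          (st.1 ++ [if url ≠ "" then "- [" ++ title ++ "](" ++ url ++ ")" else "- " ++ title],
           PySem.Set.add st.2 key))
    = (fun (st : List String × PySem.Set (String × String)) a =>
        if PySem.Set.contains st.2 (fsPair a) then st
        else (st.1 ++ [fsRender (fsPair a)], PySem.Set.add st.2 (fsPair a))) := by
  funext st a
  simp only [fsPair, fsRender]

-- B's repeated-filtering loop, fed the not-yet-seen elements, produces exactly the
-- lines for what Set.update appends to the seen set.
lemma fs_loop_eq : ∀ (ps : List (String × String)) (s : PySem.Set (String × String)) (l : List String),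
    fsLoop (ps.filter (fun q => decide (q ∉ s))) l
      = l ++ ((PySem.Set.update s ps).drop s.length).map fsRender := by
  intro ps
  induction ps with
  | nil => intro s l; simp [fsLoop_nil, PySem.Set.update]
  | cons p ps ih =>
    intro s l
    rw [PySem.Set.update_cons]
    by_cases h : p ∈ s
    · have hadd : PySem.Set.add s p = s := by simp [PySem.Set.add, h]
      simp only [List.filter_cons, h, not_true, decide_false, hadd]
      simpa [h] using ih s l
    · have hadd : PySem.Set.add s p = s ++ [p] := by simp [PySem.Set.add, h]
      rw [List.filter_cons]
      simp only [h, not_false_iff, decide_true, if_pos, hadd]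
      show fsLoop (p :: ps.filter (fun q => decide (q ∉ s))) l = _
      rw [fsLoop_cons]
      have hf : (ps.filter (fun q => decide (q ∉ s))).filter (fun q => q ≠ p)
          = ps.filter (fun q => decide (q ∉ s ++ [p])) := by
        rw [List.filter_filter]
        apply List.filter_congr
        intro q _
        by_cases hq : q ∈ s <;> by_cases hp : q = p <;> simp [hq, hp, List.mem_append]
      rw [hf, ih (s ++ [p]) (l ++ [fsRender p])]
      obtain ⟨t, ht⟩ := fs_prefix ps (s ++ [p])
      rw [ht]
      have h1 : ((s ++ [p]) ++ t).drop s.length = [p] ++ t := by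
        rw [List.append_assoc]; simp
      have h2 : ((s ++ [p]) ++ t).drop (s ++ [p]).length = t := by simp
      rw [h1, h2]
      simp [fsRender]

-- ===== VERDICT (by name: the statement is the Claim_ definition above) =====
theorem format_sources_md_spec : Claim_equal_format_sources_md := by
  intro articles _
  unfold Spec_format_sources_md format_sources_md format_sources_md_alt
  by_cases h : articles = []
  · simp [h]
  · simp only [h, if_false]
    rw [fs_step_eq]
    have hc := fs_core (articles.map fsPair) [] []
    rw [List.foldl_map] at hc
    rw [show (PySem.Set.empty : PySem.Set (String × String)) = [] from rfl, hc]
    have hb := fs_loop_eq (articles.map fsPair) [] []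
    simp only [List.not_mem_nil, not_false_iff, decide_true, List.filter_true] at hb
    rw [hb]
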